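-- pv_equiv track=rewrite | github.com/emarberg/stable-grothendieck | tests/test_conjectures_skew.py | sgn
-- ===== SOURCE A (Python) =====
-- def sgn(mu, nu):
--     boxes = sorted({
--         (i + 1, i + j) for i in range(len(mu)) for j in range(mu[i] + 1, nu[i] + 1)
--     })
--     sgn = 1
--     for i in range(len(boxes)):
--         _, j = boxes[i]
--         sgn *= -1 if i > 0 and boxes[i - 1][1] == j else 1
--     return sgn
-- ===== SOURCE B (Python) =====
-- def sgn(mu, nu):
--     s = 1
--     prev = None  # column of the last box of the previous non-empty row
--     for i in range(len(mu)):
--         if nu[i] > mu[i]: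
--             if prev is not None and prev == i + mu[i] + 1:
--                 s = -s
--             prev = i + nu[i]
--     return s
-- ===== Notes on version B (the rewrite author's own statement) =====
-- stated objective: faster
-- what changed: Instead of materialising every box (row, column) into a set, sorting it and scanning adjacent entries, B makes a single pass over the rows keeping only the running sign and the column of the last box of the previous non-empty row, flipping the sign when a row's first column equals it.
import Mathlib
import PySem

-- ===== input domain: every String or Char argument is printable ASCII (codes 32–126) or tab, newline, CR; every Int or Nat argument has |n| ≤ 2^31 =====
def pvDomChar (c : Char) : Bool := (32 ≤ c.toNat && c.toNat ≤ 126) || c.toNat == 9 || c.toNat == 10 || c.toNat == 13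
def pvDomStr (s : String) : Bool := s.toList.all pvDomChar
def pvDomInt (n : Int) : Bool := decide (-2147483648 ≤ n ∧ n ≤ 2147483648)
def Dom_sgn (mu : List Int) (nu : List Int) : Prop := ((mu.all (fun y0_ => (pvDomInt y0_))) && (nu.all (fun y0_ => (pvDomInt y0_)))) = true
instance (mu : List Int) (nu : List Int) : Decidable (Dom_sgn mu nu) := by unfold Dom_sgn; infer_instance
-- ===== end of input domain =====

-- B replaces 'sort all boxes, scan adjacent pairs' by one pass over the rows that keeps only
-- the previous non-empty row's last column (asymptotically faster: O(rows) vs O(boxes log boxes)).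

-- ===== PORT A =====
-- Python's set comprehension builds a hash set; PySem.Set.ofList (a quadratic list-scan dedup)
-- is too slow to evaluate on admitted inputs, so the set is ported as an order-preserving
-- dedup backed by Std.HashSet; it is proved equal to PySem.Set.ofList (fastSetOfList_eq below).
def fastSetLoop : List (Int × Int) → Std.HashSet (Int × Int) → List (Int × Int) → List (Int × Int)
  | [], _, acc => acc
  | x :: xs, seen, acc =>
    if seen.contains x then fastSetLoop xs seen acc
    else fastSetLoop xs (seen.insert x) (acc ++ [x])

def fastSetOfList (xs : List (Int × Int)) : List (Int × Int) := fastSetLoop xs ∅ []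

def sgn (mu : List Int) (nu : List Int) : Int :=
  let raw := (List.range mu.length).flatMap (fun i =>
    (PySem.List.pyRange (mu.getD i 0 + 1) (nu.getD i 0 + 1) 1).map
      (fun j => ((i : Int) + 1, (i : Int) + j)))
  -- Python's sorted() is a stable mergesort (timsort); PySem.List.sorted2 (an insertion sort)
  -- overflows the interpreter stack on admitted inputs, so 'sorted' is ported by hand as the
  -- stable List.mergeSort with Python's lexicographic tuple comparison (exact: both are stable
  -- sorts for the same total order); boxes[i] (O(1) in Python) is read through an Array.
  let boxes := (fastSetOfList raw).mergeSort
    (fun p q => decide (p.1 < q.1) || (decide (p.1 = q.1) && decide (p.2 ≤ q.2)))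
  let arr := boxes.toArray
  (List.range boxes.length).foldl
    (fun s i =>
      let j := (arr.getD i ((0 : Int), (0 : Int))).2
      s * (if 0 < i ∧ (arr.getD (i - 1) ((0 : Int), (0 : Int))).2 = j then -1 else 1)) 1

-- ===== PORT B =====
def sgn_alt (mu : List Int) (nu : List Int) : Int :=
  -- 'prev is not None and prev == i + mu[i] + 1' is exactly 'st.2 = some (i + mu[i] + 1)'
  ((List.range mu.length).foldl
    (fun (st : Int × Option Int) i =>
      if mu.getD i 0 < nu.getD i 0 then
        ((if st.2 = some ((i : Int) + mu.getD i 0 + 1) then -st.1 else st.1),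
         some ((i : Int) + nu.getD i 0))
      else st) ((1 : Int), (none : Option Int))).1

-- ===== PRECONDITION & SPEC =====
-- Pre_ excludes exactly the inputs where Python A raises IndexError: nu shorter than mu
-- (nu[i] is read for every i in range(len(mu))).
def Pre_sgn (mu : List Int) (nu : List Int) : Prop := mu.length ≤ nu.length
instance (mu : List Int) (nu : List Int) : Decidable (Pre_sgn mu nu) := by unfold Pre_sgn; infer_instance
def pvWitness_sgn : List Int × List Int := ([0, 1], [2, 3])

def Spec_sgn (mu : List Int) (nu : List Int) (out : Int) : Prop := out = sgn_alt mu nu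
instance (mu : List Int) (nu : List Int) (out : Int) : Decidable (Spec_sgn mu nu out) := by unfold Spec_sgn; infer_instance

-- ===== CLAIM (what is proved, stated in full; the proofs are below) =====
def Claim_equal_sgn : Prop := ∀ (mu : List Int) (nu : List Int), Dom_sgn mu nu → Pre_sgn mu nu → Spec_sgn mu nu (sgn mu nu)

-- ===== LEMMAS AND PROOFS =====

-- the list of boxes contributed by row i, in A's generation order
def rowFn (mu nu : List Int) (i : Nat) : List (Int × Int) :=
  (PySem.List.pyRange (mu.getD i 0 + 1) (nu.getD i 0 + 1) 1).map
    (fun j => ((i : Int) + 1, (i : Int) + j))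

-- strict lexicographic order on boxes (Python's tuple order)
def lexlt (a b : Int × Int) : Prop := a.1 < b.1 ∨ (a.1 = b.1 ∧ a.2 < b.2)

-- the sign of a box list scanned left to right, given the previous box's column
def signAdj : Option Int → List (Int × Int) → Int
  | _, [] => 1
  | prev, x :: xs => (if prev = some x.2 then -1 else 1) * signAdj (some x.2) xs

-- column of the last box, falling back to prev
def lastSnd (prev : Option Int) (l : List (Int × Int)) : Option Int :=
  match l.getLast? with
  | some y => some y.2
  | none => prev

theorem fastSetLoop_eq :
    ∀ (xs : List (Int × Int)) (seen : Std.HashSet (Int × Int)) (acc : List (Int × Int)),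
      (∀ a : Int × Int, seen.contains a = acc.contains a) →
      fastSetLoop xs seen acc = xs.foldl PySem.Set.add acc := by
  intro xs
  induction xs with
  | nil => intro seen acc _; rfl
  | cons x xs ih =>
    intro seen acc hinv
    rw [List.foldl_cons]
    unfold fastSetLoop
    by_cases hx : seen.contains x = true
    · rw [if_pos hx]
      have hadd : PySem.Set.add acc x = acc := by
        unfold PySem.Set.add PySem.Set.contains
        rw [if_pos (by rw [← hinv]; exact hx)]
      rw [hadd]
      exact ih seen acc hinv
    · rw [if_neg hx]
      have hadd : PySem.Set.add acc x = acc ++ [x] := by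
        unfold PySem.Set.add PySem.Set.contains
        rw [if_neg (by rw [← hinv]; exact hx)]
      rw [hadd]
      refine ih _ _ ?_
      intro a
      rw [Std.HashSet.contains_insert, hinv a]
      simp [Bool.or_comm, eq_comm]
      by_cases he : x = a <;> simp [he]

theorem fastSetOfList_eq (xs : List (Int × Int)) :
    fastSetOfList xs = PySem.Set.ofList xs := by
  unfold fastSetOfList PySem.Set.ofList
  exact fastSetLoop_eq xs ∅ [] (by intro a; simp)

theorem arr_getD (l : List (Int × Int)) (i : Nat) (d : Int × Int) :
    l.toArray.getD i d = l.getD i d := by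
  simp only [Array.getD, List.getD_eq_getElem?_getD]
  split
  · rename_i h
    have h2 : i < l.length := by simpa using h
    have h3 := List.getElem_toArray (xs := l) (i := i) h
    rw [List.getElem?_eq_getElem h2]
    exact h3
  · rename_i h
    have h2 : l.length ≤ i := by simpa using h
    rw [List.getElem?_eq_none h2]
    rfl

theorem rowFn_pairwise (mu nu : List Int) (i : Nat) :
    (rowFn mu nu i).Pairwise lexlt := by
  unfold rowFn
  refine List.Pairwise.map _ ?_ (PySem.List.pairwise_lt_pyRange_one _ _)
  intro a b hab
  right; constructor
  · rfl
  · omega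

theorem flatMap_pairwise (mu nu : List Int) :
    ∀ (idxs : List Nat), idxs.Pairwise (· < ·) →
      (idxs.flatMap (rowFn mu nu)).Pairwise lexlt := by
  intro idxs
  induction idxs with
  | nil => intro _; simp
  | cons i rest ih =>
    intro hp
    simp only [List.flatMap_cons]
    rw [List.pairwise_append]
    refine ⟨rowFn_pairwise mu nu i, ih (List.Pairwise.of_cons hp), ?_⟩
    intro a ha b hb
    rcases List.mem_flatMap.mp hb with ⟨i', hi', hb'⟩
    have hii : i < i' := (List.pairwise_cons.mp hp).1 i' hi'
    unfold rowFn at ha hb'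
    rcases List.mem_map.mp ha with ⟨_, _, rfl⟩
    rcases List.mem_map.mp hb' with ⟨_, _, rfl⟩
    left
    simp only
    omega

theorem boxes_eq_raw (mu nu : List Int) :
    ((fastSetOfList ((List.range mu.length).flatMap (rowFn mu nu))).mergeSort
      (fun p q => decide (p.1 < q.1) || (decide (p.1 = q.1) && decide (p.2 ≤ q.2))))
    = (List.range mu.length).flatMap (rowFn mu nu) := by
  have hpl : ((List.range mu.length).flatMap (rowFn mu nu)).Pairwise lexlt :=
    flatMap_pairwise mu nu _ List.pairwise_lt_range
  have hnd : ((List.range mu.length).flatMap (rowFn mu nu)).Nodup := by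
    refine List.Pairwise.imp ?_ hpl
    intro a b h
    rcases h with h | ⟨h1, h2⟩
    · intro hab; subst hab; omega
    · intro hab; subst hab; omega
  rw [fastSetOfList_eq, PySem.Set.ofList_eq_self_of_nodup _ hnd]
  refine List.mergeSort_of_pairwise ?_
  refine List.Pairwise.imp ?_ hpl
  intro a b h
  rcases h with h | ⟨h1, h2⟩ <;> simp <;> omega

theorem signAdj_append_one :
    ∀ (l : List (Int × Int)) (prev : Option Int) (x : Int × Int),
      signAdj prev (l ++ [x])
        = signAdj prev l * (if lastSnd prev l = some x.2 then -1 else 1) := by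
  intro l
  induction l with
  | nil => intro prev x; simp [signAdj, lastSnd]
  | cons y ys ih =>
    intro prev x
    simp only [List.cons_append, signAdj]
    rw [ih]
    have : lastSnd prev (y :: ys) = lastSnd (some y.2) ys := by
      unfold lastSnd
      cases h : ys.getLast? with
      | none => simp [List.getLast?_eq_none_iff.mp h]
      | some z => simp [List.getLast?_cons, h]
    rw [this]; ring

theorem foldA_aux (l : List (Int × Int)) :
    ∀ (s : Int),
      (List.range l.length).foldl
        (fun s i =>
          let j := (l.toArray.getD i ((0 : Int), (0 : Int))).2
          s * (if 0 < i ∧ (l.toArray.getD (i - 1) ((0 : Int), (0 : Int))).2 = j then -1 else 1)) s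
      = s * signAdj none l := by
  simp only [arr_getD]
  induction l using List.reverseRecOn with
  | nil => intro s; simp [signAdj]
  | append_singleton l x ih =>
    intro s
    rw [List.length_append, List.length_singleton, List.range_succ, List.foldl_append]
    rw [PySem.List.foldl_congr_mem (List.range l.length) _
      (fun s i =>
        let j := (l.getD i ((0 : Int), (0 : Int))).2
        s * (if 0 < i ∧ (l.getD (i - 1) ((0 : Int), (0 : Int))).2 = j then -1 else 1)) s
      (by
        intro acc i hi
        have hi' : i < l.length := List.mem_range.mp hi
        simp only
        rw [List.getD_append _ _ _ _ hi', List.getD_append _ _ _ _ (by omega)])]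
    rw [ih, signAdj_append_one]
    simp only [List.foldl_cons, List.foldl_nil]
    rw [mul_assoc]
    congr 1
    congr 1
    have hx : (l ++ [x]).getD l.length ((0 : Int), (0 : Int)) = x := by
      rw [List.getD_append_right _ _ _ _ (le_refl _)]; simp
    rw [hx]
    rcases List.eq_nil_or_concat l with rfl | ⟨l', y, rfl⟩
    · simp [lastSnd]
    · simp only [List.concat_eq_append]
      have hlen : 0 < (l' ++ [y]).length := by simp
      have hlast : (l' ++ [y] ++ [x]).getD ((l' ++ [y]).length - 1) ((0 : Int), (0 : Int)) = y := by
        rw [List.getD_append _ _ _ _ (by simp)]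
        rw [List.getD_append_right _ _ _ _ (by simp)]
        simp
      have hls : lastSnd none (l' ++ [y]) = some y.2 := by
        unfold lastSnd; rw [List.getLast?_concat]
      rw [hlast, hls]
      by_cases h : y.2 = x.2 <;> simp [h]

theorem signAdj_row (i b : Int) :
    ∀ (n : Nat) (a : Int), (b - a).toNat = n → ∀ (prev : Option Int) (rest : List (Int × Int)),
      signAdj prev ((PySem.List.pyRange (a + 1) (b + 1) 1).map (fun j => (i + 1, i + j)) ++ rest)
        = (if a < b ∧ prev = some (i + a + 1) then -1 else 1)
          * signAdj (if a < b then some (i + b) else prev) rest := by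
  intro n
  induction n with
  | zero =>
    intro a h prev rest
    rw [PySem.List.pyRange_one_eq_nil (by omega)]
    simp [show ¬ a < b by omega]
  | succ n ih =>
    intro a h prev rest
    have hab : a < b := by omega
    rw [PySem.List.pyRange_one_cons (by omega : a + 1 < b + 1)]
    simp only [List.map_cons, List.cons_append, signAdj]
    rw [ih (a + 1) (by omega) (some (i + (a + 1))) rest]
    have h3 : (if a + 1 < b ∧ some (i + (a + 1)) = some (i + (a + 1) + 1) then (-1 : Int) else 1) = 1 := by
      rw [if_neg]
      intro hcon
      exact absurd (Option.some_inj.mp hcon.2) (by omega)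
    rw [h3]
    have h2 : (if a + 1 < b then some (i + b) else some (i + (a + 1))) = some (i + b) := by
      split
      · rfl
      · congr 1; omega
    rw [h2]
    have he : i + (a + 1) = i + a + 1 := by ring
    rw [he, if_pos hab]
    by_cases hp : prev = some (i + a + 1)
    · rw [if_pos hp, if_pos ⟨hab, hp⟩]; ring
    · rw [if_neg hp, if_neg (by rintro ⟨_, h⟩; exact hp h)]; ring

theorem foldB_aux (mu nu : List Int) :
    ∀ (idxs : List Nat) (s : Int) (prev : Option Int),
      (idxs.foldl
        (fun (st : Int × Option Int) i =>
          if mu.getD i 0 < nu.getD i 0 then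
            ((if st.2 = some ((i : Int) + mu.getD i 0 + 1) then -st.1 else st.1),
             some ((i : Int) + nu.getD i 0))
          else st) (s, prev)).1
      = s * signAdj prev (idxs.flatMap (rowFn mu nu)) := by
  intro idxs
  induction idxs with
  | nil => intro s prev; simp [signAdj]
  | cons i rest ih =>
    intro s prev
    simp only [List.foldl_cons, List.flatMap_cons]
    have hrow : ∀ (prev : Option Int) (rest' : List (Int × Int)),
        signAdj prev (rowFn mu nu i ++ rest')
          = (if mu.getD i 0 < nu.getD i 0 ∧ prev = some ((i : Int) + mu.getD i 0 + 1)
              then -1 else 1)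
            * signAdj (if mu.getD i 0 < nu.getD i 0 then some ((i : Int) + nu.getD i 0) else prev)
                rest' := by
      intro prev rest'
      unfold rowFn
      exact signAdj_row ((i : Int)) (nu.getD i 0) ((nu.getD i 0 - mu.getD i 0).toNat)
        (mu.getD i 0) rfl prev rest'
    by_cases hc : mu.getD i 0 < nu.getD i 0
    · rw [if_pos hc, ih, hrow, if_pos hc]
      by_cases hp : prev = some ((i : Int) + mu.getD i 0 + 1)
      · rw [if_pos hp, if_pos ⟨hc, hp⟩]; ring
      · rw [if_neg hp, if_neg (by rintro ⟨_, h⟩; exact hp h)]; ring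
    · rw [if_neg hc, ih]
      have hnil : rowFn mu nu i = [] := by
        unfold rowFn
        rw [PySem.List.pyRange_one_eq_nil (by omega : nu.getD i 0 + 1 ≤ mu.getD i 0 + 1)]
        simp
      rw [hnil, List.nil_append]

-- ===== VERDICT (by name: the statement is the Claim_ definition above) =====
theorem sgn_spec : Claim_equal_sgn := by
  intro mu nu _ _
  unfold Spec_sgn sgn sgn_alt
  simp only
  rw [show ((List.range mu.length).flatMap (fun i =>
      (PySem.List.pyRange (mu.getD i 0 + 1) (nu.getD i 0 + 1) 1).map
        (fun j => ((i : Int) + 1, (i : Int) + j)))) = (List.range mu.length).flatMap (rowFn mu nu) from rfl]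
  rw [boxes_eq_raw mu nu]
  rw [foldA_aux]
  rw [foldB_aux]
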